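-- pv_equiv track=rewrite | github.com/platform-mesh/samples-opendesk-ocm-k8s-toolkit | scripts/extract-oci-image-urls/update_component_constructors.py | _are_chart_names_similar
-- ===== SOURCE A (Python) =====
-- def _are_chart_names_similar(name1: str, name2: str) -> bool:
--     """Check if two chart names are similar (handle variations)."""
--     # Handle common variations
--     variations = {
--         'cert-manager': ['cert-manager-cainjector', 'cert-manager-webhook'],
--         'collabora-online': ['collabora'],
--         'clamav-simple': ['clamav'],
--         'ingress-nginx': ['nginx'],
--         'opendesk-jitsi': ['jitsi'],
--         'opendesk-nextcloud': ['nextcloud', 'aio', 'exporter'],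
--         'matrix-neoboard-widget': ['neoboard'],
--         'matrix-neochoice-widget': ['neochoice'],
--         'matrix-neodatefix-widget': ['neodatefix-widget'],
--         'matrix-neodatefix-bot': ['neodatefix-bot'],
--         'opendesk-element': ['element'],
--         'opendesk-synapse': ['synapse'],
--         'opendesk-synapse-web': ['synapse-web'],
--         'opendesk-well-known': ['well-known'],
--         'opendesk-static-files': ['static-files'],
--         'opendesk-matrix-user-verification-service': ['matrix-user-verification'],
--     }
--
--     # Check direct variations
--     for base_name, variants in variations.items():
--         if (name1 == base_name and name2 in variants) or (name2 == base_name and name1 in variants):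
--             return True
--         if name1 in variants and name2 in variants:
--             return True
--
--     # Check substring matching for similar names
--     if len(name1) > 3 and len(name2) > 3:
--         if name1 in name2 or name2 in name1:
--             return True
--
--     return False
-- ===== SOURCE B (Python) =====
-- _VARIATIONS = {
--     'cert-manager': ['cert-manager-cainjector', 'cert-manager-webhook'],
--     'collabora-online': ['collabora'],
--     'clamav-simple': ['clamav'],
--     'ingress-nginx': ['nginx'],
--     'opendesk-jitsi': ['jitsi'],
--     'opendesk-nextcloud': ['nextcloud', 'aio', 'exporter'],
--     'matrix-neoboard-widget': ['neoboard'],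
--     'matrix-neochoice-widget': ['neochoice'],
--     'matrix-neodatefix-widget': ['neodatefix-widget'],
--     'matrix-neodatefix-bot': ['neodatefix-bot'],
--     'opendesk-element': ['element'],
--     'opendesk-synapse': ['synapse'],
--     'opendesk-synapse-web': ['synapse-web'],
--     'opendesk-well-known': ['well-known'],
--     'opendesk-static-files': ['static-files'],
--     'opendesk-matrix-user-verification-service': ['matrix-user-verification'],
-- }
--
-- # Flat index built once: every base name and every variant maps to its group id.
-- _GROUP = {}
-- for _gid, (_base, _variants) in enumerate(_VARIATIONS.items()):
--     _GROUP[_base] = _gid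
--     for _v in _variants:
--         _GROUP[_v] = _gid
--
--
-- def _are_chart_names_similar(name1: str, name2: str) -> bool:
--     """Check if two chart names are similar (handle variations)."""
--     g1 = _GROUP.get(name1)
--     if g1 is not None and g1 == _GROUP.get(name2):
--         return True
--     # Substring matching for similar names
--     if len(name1) > 3 and len(name2) > 3 and (name1 in name2 or name2 in name1):
--         return True
--     return False
-- ===== Notes on version B (the rewrite author's own statement) =====
-- stated objective: simpler
-- what changed: Replaces A's per-call scan over all variation groups (with three membership tests per group) by a flat name-to-group-id dict built once at module load; the call itself becomes two lookups plus the unchanged substring fallback.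
import Mathlib
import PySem

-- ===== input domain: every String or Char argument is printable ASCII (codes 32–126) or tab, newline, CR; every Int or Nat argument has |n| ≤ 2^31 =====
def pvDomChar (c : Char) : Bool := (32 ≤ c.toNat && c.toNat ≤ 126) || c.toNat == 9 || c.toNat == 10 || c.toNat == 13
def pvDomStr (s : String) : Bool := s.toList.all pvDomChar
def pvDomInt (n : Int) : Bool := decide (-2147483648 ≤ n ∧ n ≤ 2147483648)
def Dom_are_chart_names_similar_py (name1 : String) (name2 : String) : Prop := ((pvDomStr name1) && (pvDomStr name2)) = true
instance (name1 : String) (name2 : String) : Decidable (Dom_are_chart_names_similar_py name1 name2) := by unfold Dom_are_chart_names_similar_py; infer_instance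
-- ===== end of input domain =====

-- B replaces A's per-call scan over the variation groups by a flat name→group-id index
-- built once, with the same substring fallback (objective: simpler per-call logic).

-- ===== PORT A =====
def pvVariations : List (String × List String) :=
  [("cert-manager", ["cert-manager-cainjector", "cert-manager-webhook"]),
   ("collabora-online", ["collabora"]),
   ("clamav-simple", ["clamav"]),
   ("ingress-nginx", ["nginx"]),
   ("opendesk-jitsi", ["jitsi"]),
   ("opendesk-nextcloud", ["nextcloud", "aio", "exporter"]),
   ("matrix-neoboard-widget", ["neoboard"]),
   ("matrix-neochoice-widget", ["neochoice"]),
   ("matrix-neodatefix-widget", ["neodatefix-widget"]),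
   ("matrix-neodatefix-bot", ["neodatefix-bot"]),
   ("opendesk-element", ["element"]),
   ("opendesk-synapse", ["synapse"]),
   ("opendesk-synapse-web", ["synapse-web"]),
   ("opendesk-well-known", ["well-known"]),
   ("opendesk-static-files", ["static-files"]),
   ("opendesk-matrix-user-verification-service", ["matrix-user-verification"])]

-- A's for-loop with its two early returns, as structural recursion over the dict items
def pvCheckVariations (name1 name2 : String) : List (String × List String) → Bool
  | [] => false
  | (base, vs) :: rest =>
    if (name1 == base && vs.contains name2) || (name2 == base && vs.contains name1) then true
    else if vs.contains name1 && vs.contains name2 then true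
    else pvCheckVariations name1 name2 rest

def are_chart_names_similar_py (name1 : String) (name2 : String) : Bool :=
  if pvCheckVariations name1 name2 pvVariations then true
  else if decide (3 < PySem.Str.len name1) && decide (3 < PySem.Str.len name2) then
    if PySem.Str.isIn name1 name2 || PySem.Str.isIn name2 name1 then true else false
  else false

-- ===== PORT B =====
-- the module-level index build: for gid, (base, variants) in enumerate(_VARIATIONS.items()): ...
-- (Source B carries its own copy of the variation table; the identical literal is shared here)
def pvGroup : PySem.Dict String Int :=
  (PySem.List.enumerate pvVariations 0).foldl
    (fun d p => p.2.2.foldl (fun d' v => d'.insert v p.1) (d.insert p.2.1 p.1))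
    PySem.Dict.empty

def are_chart_names_similar_py_alt (name1 : String) (name2 : String) : Bool :=
  let g1 := pvGroup.get? name1
  if g1.isSome && g1 == pvGroup.get? name2 then true
  else if decide (3 < PySem.Str.len name1) && decide (3 < PySem.Str.len name2)
          && (PySem.Str.isIn name1 name2 || PySem.Str.isIn name2 name1) then true
  else false

-- ===== PRECONDITION & SPEC =====
def Spec_are_chart_names_similar_py (name1 : String) (name2 : String) (out : Bool) : Prop := out = are_chart_names_similar_py_alt name1 name2
instance (name1 : String) (name2 : String) (out : Bool) : Decidable (Spec_are_chart_names_similar_py name1 name2 out) := by unfold Spec_are_chart_names_similar_py; infer_instance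

-- ===== CLAIM (what is proved, stated in full; the proofs are below) =====
def Claim_equal_are_chart_names_similar_py : Prop := ∀ (name1 : String) (name2 : String), Dom_are_chart_names_similar_py name1 name2 → Spec_are_chart_names_similar_py name1 name2 (are_chart_names_similar_py name1 name2)

-- ===== LEMMAS AND PROOFS =====
-- all names occurring in the variation table (bases and variants)
def pvAllNames : List String :=
  (pvVariations.map Prod.fst) ++ (pvVariations.map Prod.snd).flatten

set_option maxRecDepth 100000 in
lemma pv_fin_pairs : ∀ n1 ∈ pvAllNames, ∀ n2 ∈ pvAllNames,
    are_chart_names_similar_py n1 n2 = are_chart_names_similar_py_alt n1 n2 := by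
  decide

set_option maxRecDepth 100000 in
lemma pv_keys_sub : ∀ x ∈ pvGroup.keys, x ∈ pvAllNames := by decide

lemma pv_get?_none (n : String) (h : n ∉ pvAllNames) : pvGroup.get? n = none := by
  have hc : ¬ pvGroup.contains n = true := fun hk =>
    h (pv_keys_sub n (((PySem.Dict.contains_iff_mem_keys _ _).mp hk)))
  rw [PySem.Dict.get?_eq_none_iff_contains]
  simpa using hc

lemma pv_loop_false_of_left (n1 n2 : String) (l : List (String × List String))
    (h : ∀ p ∈ l, n1 ≠ p.1 ∧ n1 ∉ p.2) : pvCheckVariations n1 n2 l = false := by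
  induction l with
  | nil => rfl
  | cons p rest ih =>
    obtain ⟨hb, hv⟩ := h p (List.mem_cons_self)
    have hbv : (n1 == p.1) = false := by simpa using hb
    have hrest := ih (fun q hq => h q (List.mem_cons_of_mem _ hq))
    simp [pvCheckVariations, hbv, hrest]
    tauto

lemma pv_loop_false_of_right (n1 n2 : String) (l : List (String × List String))
    (h : ∀ p ∈ l, n2 ≠ p.1 ∧ n2 ∉ p.2) : pvCheckVariations n1 n2 l = false := by
  induction l with
  | nil => rfl
  | cons p rest ih =>
    obtain ⟨hb, hv⟩ := h p (List.mem_cons_self)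
    have hbv : (n2 == p.1) = false := by simpa using hb
    have hrest := ih (fun q hq => h q (List.mem_cons_of_mem _ hq))
    simp [pvCheckVariations, hbv, hrest]
    tauto

lemma pv_not_mem_table (n : String) (h : n ∉ pvAllNames) :
    ∀ p ∈ pvVariations, n ≠ p.1 ∧ n ∉ p.2 := by
  intro p hp
  constructor
  · intro e
    exact h (List.mem_append_left _ (e ▸ List.mem_map_of_mem hp))
  · intro e
    exact h (List.mem_append_right _ (List.mem_flatten.mpr ⟨p.2, List.mem_map_of_mem hp, e⟩))

lemma pv_loop_false_left (n1 n2 : String) (h : n1 ∉ pvAllNames) :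
    pvCheckVariations n1 n2 pvVariations = false :=
  pv_loop_false_of_left n1 n2 pvVariations (pv_not_mem_table n1 h)

lemma pv_loop_false_right (n1 n2 : String) (h : n2 ∉ pvAllNames) :
    pvCheckVariations n1 n2 pvVariations = false :=
  pv_loop_false_of_right n1 n2 pvVariations (pv_not_mem_table n2 h)

-- ===== VERDICT (by name: the statement is the Claim_ definition above) =====
theorem are_chart_names_similar_py_spec : Claim_equal_are_chart_names_similar_py := by
  intro n1 n2 _
  unfold Spec_are_chart_names_similar_py
  by_cases h1 : n1 ∈ pvAllNames
  · by_cases h2 : n2 ∈ pvAllNames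
    · exact pv_fin_pairs n1 h1 n2 h2
    · have hg := pv_get?_none n2 h2
      have hl := pv_loop_false_right n1 n2 h2
      unfold are_chart_names_similar_py are_chart_names_similar_py_alt
      rw [hl, hg]
      cases hgo : pvGroup.get? n1 <;>
        cases hs1 : PySem.Str.isIn n1 n2 <;> cases hs2 : PySem.Str.isIn n2 n1 <;>
        by_cases hL1 : (3 : Int) < PySem.Str.len n1 <;> by_cases hL2 : (3 : Int) < PySem.Str.len n2 <;>
        simp
  · have hg := pv_get?_none n1 h1
    have hl := pv_loop_false_left n1 n2 h1
    unfold are_chart_names_similar_py are_chart_names_similar_py_alt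
    rw [hl, hg]
    cases hs1 : PySem.Str.isIn n1 n2 <;> cases hs2 : PySem.Str.isIn n2 n1 <;>
      by_cases hL1 : (3 : Int) < PySem.Str.len n1 <;> by_cases hL2 : (3 : Int) < PySem.Str.len n2 <;>
      simp
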